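-- pv_equiv track=rewrite | github.com/q3w2e1/GNSS-to-OSM | osmProjekt/deps/functions/consequtive_repetitions/consequtive_repetitions.py | consequtive_repetitions
-- ===== SOURCE A (Python) =====
-- def consequtive_repetitions(in_list, expected_range=15):
--     """Function solves a problem of repeating the same items in a list.
--     The repetition is understood as more numbers repeating in certain
--     range. As an output, functions returns a list where those
--     repetitive items are excluded.
--
--     Args:
--     expected_range -- determines how big this range, in which we
--                       want to ignore any duplicates, is (default 15)
--     """
--     out_list = []
--     for i in range(0, len(in_list)):
--         if i == 0 or i > (len(in_list) - expected_range):
--             out_list.append(in_list[i])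
--             continue
--         flag = 0
--         for k in range(1, expected_range):
--             if in_list[i] == in_list[i+k]:
--                 flag = 1
--         if flag == 1:
--             continue
--         out_list.append(in_list[i])
--     return out_list
-- ===== SOURCE B (Python) =====
-- def consequtive_repetitions(in_list, expected_range=15):
--     """Sliding-window re-implementation: keep an element checked by the
--     original only if its count in the forward window is zero; the window
--     multiset is maintained in O(1) per step instead of rescanned."""
--     n = len(in_list)
--     limit = n - expected_range  # checked indices are 1..limit
--     if expected_range <= 1 or limit < 1:
--         return list(in_list)
--     cnt = {}
--     for j in range(2, expected_range + 1):  # window of i=1: positions 2..R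
--         cnt[in_list[j]] = cnt.get(in_list[j], 0) + 1
--     out = [in_list[0]]
--     for i in range(1, limit + 1):
--         if cnt.get(in_list[i], 0) == 0:
--             out.append(in_list[i])
--         if i < limit:  # slide: drop position i+1, add position i+R
--             cnt[in_list[i + 1]] -= 1
--             j = i + expected_range
--             cnt[in_list[j]] = cnt.get(in_list[j], 0) + 1
--     out.extend(in_list[limit + 1:])
--     return out
-- ===== Notes on version B (the rewrite author's own statement) =====
-- stated objective: faster
-- what changed: Replaced the inner rescan of the forward window (for each index, a loop over expected_range positions) by a sliding-window multiset counter (dict) updated in O(1) per index, plus direct copying of the unconditionally-kept head and tail.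
import Mathlib
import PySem

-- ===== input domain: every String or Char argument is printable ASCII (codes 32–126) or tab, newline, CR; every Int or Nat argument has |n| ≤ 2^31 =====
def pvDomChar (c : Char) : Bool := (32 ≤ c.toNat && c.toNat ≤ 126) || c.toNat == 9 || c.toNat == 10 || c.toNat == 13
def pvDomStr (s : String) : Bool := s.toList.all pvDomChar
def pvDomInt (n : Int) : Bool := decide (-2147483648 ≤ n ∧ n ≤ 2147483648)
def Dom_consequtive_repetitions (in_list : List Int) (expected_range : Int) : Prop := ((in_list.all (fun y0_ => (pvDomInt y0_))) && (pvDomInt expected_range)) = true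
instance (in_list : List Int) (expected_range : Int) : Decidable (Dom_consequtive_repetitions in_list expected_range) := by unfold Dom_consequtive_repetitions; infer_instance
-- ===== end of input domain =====

-- B replaces A's per-index rescan of the forward window by a sliding-window counter; return values proved equal on all inputs.

-- ===== PORT A =====
def consequtive_repetitions (in_list : List Int) (expected_range : Int) : List Int :=
  (PySem.List.pyRange 0 (in_list.length : Int) 1).foldl (fun out_list i =>
    if i == 0 || i > ((in_list.length : Int) - expected_range) then
      out_list ++ [PySem.List.pyGetD in_list i 0]
    else
      -- inner loop: flag = 1 if in_list[i] reappears within the window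
      -- (indices i and i+k are always in range when this branch runs, so pyGetD's default is never used)
      let flag : Int := (PySem.List.pyRange 1 expected_range 1).foldl
        (fun flag k =>
          if PySem.List.pyGetD in_list i 0 == PySem.List.pyGetD in_list (i + k) 0 then 1 else flag) 0
      if flag == 1 then out_list else out_list ++ [PySem.List.pyGetD in_list i 0]) []

-- ===== PORT B =====
def consequtive_repetitions_alt (in_list : List Int) (expected_range : Int) : List Int :=
  let n : Int := in_list.length
  let limit : Int := n - expected_range
  if expected_range ≤ 1 ∨ limit < 1 then in_list
  else
    -- initial window counter for i = 1: positions 2 .. expected_range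
    let cnt0 : PySem.Dict Int Int := (PySem.List.pyRange 2 (expected_range + 1) 1).foldl
      (fun cnt j =>
        cnt.insert (PySem.List.pyGetD in_list j 0) (cnt.getD (PySem.List.pyGetD in_list j 0) 0 + 1))
      PySem.Dict.empty
    let st := (PySem.List.pyRange 1 (limit + 1) 1).foldl
      (fun (st : PySem.Dict Int Int × List Int) i =>
        let out := if st.1.getD (PySem.List.pyGetD in_list i 0) 0 == 0
                   then st.2 ++ [PySem.List.pyGetD in_list i 0] else st.2
        if i < limit then
          -- slide: cnt[in_list[i+1]] -= 1 (the key is always in the window, so modify = Python's read-then-assign);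
          -- then cnt[in_list[i+R]] = cnt.get(in_list[i+R], 0) + 1
          let c1 := st.1.modify (PySem.List.pyGetD in_list (i + 1) 0) 0 (· - 1)
          (c1.insert (PySem.List.pyGetD in_list (i + expected_range) 0)
             (c1.getD (PySem.List.pyGetD in_list (i + expected_range) 0) 0 + 1), out)
        else (st.1, out))
      (cnt0, [PySem.List.pyGetD in_list 0 0])
    st.2 ++ PySem.List.slice in_list (some (limit + 1)) none

-- ===== PRECONDITION & SPEC =====
def Spec_consequtive_repetitions (in_list : List Int) (expected_range : Int) (out : List Int) : Prop := out = consequtive_repetitions_alt in_list expected_range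
instance (in_list : List Int) (expected_range : Int) (out : List Int) : Decidable (Spec_consequtive_repetitions in_list expected_range out) := by unfold Spec_consequtive_repetitions; infer_instance

-- ===== CLAIM (what is proved, stated in full; the proofs are below) =====
def Claim_equal_consequtive_repetitions : Prop := ∀ (in_list : List Int) (expected_range : Int), Dom_consequtive_repetitions in_list expected_range → Spec_consequtive_repetitions in_list expected_range (consequtive_repetitions in_list expected_range)

-- ===== LEMMAS AND PROOFS =====

-- the forward window of values scanned by A's inner loop at index i
def pvWin (xs : List Int) (R i : Int) : List Int :=
  (PySem.List.pyRange (i + 1) (i + R) 1).map (fun j => PySem.List.pyGetD xs j 0)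

-- A's inner flag loop yields 1 iff some window position matches
theorem pv_flag_foldl (l : List Int) (q : Int → Bool) (c : Int) :
    l.foldl (fun f k => if q k then (1 : Int) else f) c
      = if l.any q then 1 else c := by
  induction l generalizing c with
  | nil => simp
  | cons a t ih =>
    simp only [List.foldl_cons, List.any_cons, ih]
    by_cases h : q a = true <;> simp [h]

theorem pv_flag_iff (xs : List Int) (R i : Int) :
    (((PySem.List.pyRange 1 R 1).any fun k =>
        PySem.List.pyGetD xs i 0 == PySem.List.pyGetD xs (i + k) 0) = true)
      ↔ 0 < (pvWin xs R i).count (PySem.List.pyGetD xs i 0) := by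
  rw [List.count_pos_iff]
  simp only [List.any_eq_true, PySem.List.mem_pyRange_one, pvWin, List.mem_map, beq_iff_eq]
  constructor
  · rintro ⟨k, ⟨hk1, hk2⟩, he⟩
    exact ⟨i + k, ⟨by omega, by omega⟩, he.symm⟩
  · rintro ⟨j, ⟨hj1, hj2⟩, he⟩
    refine ⟨j - i, ⟨by omega, by omega⟩, ?_⟩
    rw [show i + (j - i) = j by ring]
    exact he.symm

-- the Boolean append-condition of A at index i
def pvCond (xs : List Int) (R i : Int) : Bool :=
  (i == 0 || i > ((xs.length : Int) - R)) || ((pvWin xs R i).count (PySem.List.pyGetD xs i 0) == 0)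

-- A as filter-then-map over the index range
theorem pvA_eq (xs : List Int) (R : Int) :
    consequtive_repetitions xs R
      = ((PySem.List.pyRange 0 (xs.length : Int) 1).filter (pvCond xs R)).map
          (fun j => PySem.List.pyGetD xs j 0) := by
  unfold consequtive_repetitions
  rw [PySem.List.foldl_congr_mem _ _
      (fun out i => if pvCond xs R i then out ++ [PySem.List.pyGetD xs i 0] else out) _ ?_]
  · rw [PySem.List.foldl_append_if]
    simp
  · intro acc i _
    simp only [pv_flag_foldl, pvCond]
    by_cases h0 : (i == 0 || decide (i > (xs.length : Int) - R)) = true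
    · simp [h0]
    · by_cases h1 : ((PySem.List.pyRange 1 R 1).any fun k =>
          PySem.List.pyGetD xs i 0 == PySem.List.pyGetD xs (i + k) 0) = true
      · have h2 := (pv_flag_iff xs R i).mp h1
        have hc : ¬ ((pvWin xs R i).count (PySem.List.pyGetD xs i 0) = 0) := by omega
        simp [h0, h1, hc]
      · have h2 := mt (pv_flag_iff xs R i).mpr h1
        have hc : (pvWin xs R i).count (PySem.List.pyGetD xs i 0) = 0 := by omega
        simp [h0, h1, hc]

-- map of the element function over a tail index range is a drop
theorem pv_map_range_drop (xs : List Int) (a : Int) (ha : 0 ≤ a) :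
    (PySem.List.pyRange a (xs.length : Int) 1).map (fun j => PySem.List.pyGetD xs j 0)
      = xs.drop a.toNat := by
  apply List.ext_getElem
  · simp [PySem.List.length_pyRange_one]
    omega
  · intro k h1 h2
    simp only [List.getElem_map, PySem.List.getElem_pyRange_one, List.getElem_drop]
    have hlen : k < ((xs.length : Int) - a).toNat := by
      simpa [PySem.List.length_pyRange_one] using h1
    rw [PySem.List.pyGetD_eq_getElem xs 0 (by omega) (by omega)]
    congr 1
    omega

-- the window multiset slides by one position
theorem pv_step (xs : List Int) (R i : Int) (hR : 2 ≤ R)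
    (c : PySem.Dict Int Int)
    (hc : ∀ x, c.getD x 0 = ((pvWin xs R i).count x : Int)) :
    ∀ x, (((c.modify (PySem.List.pyGetD xs (i + 1) 0) 0 (· - 1)).insert
            (PySem.List.pyGetD xs (i + R) 0)
            ((c.modify (PySem.List.pyGetD xs (i + 1) 0) 0 (· - 1)).getD
              (PySem.List.pyGetD xs (i + R) 0) 0 + 1)).getD x 0)
          = ((pvWin xs R (i + 1)).count x : Int) := by
  intro x
  have hwin : pvWin xs R i
      = PySem.List.pyGetD xs (i + 1) 0
        :: (PySem.List.pyRange (i + 2) (i + R) 1).map (fun j => PySem.List.pyGetD xs j 0) := by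
    rw [pvWin, PySem.List.pyRange_one_cons (by omega)]
    simp [List.map_cons]
    ring_nf
  have hwin' : pvWin xs R (i + 1)
      = (PySem.List.pyRange (i + 2) (i + R) 1).map (fun j => PySem.List.pyGetD xs j 0)
        ++ [PySem.List.pyGetD xs (i + R) 0] := by
    rw [pvWin, show i + 1 + R = (i + R) + 1 by ring, PySem.List.pyRange_one_succ_right (by omega)]
    simp [show i + 1 + 1 = i + 2 by ring]
  have h1 := hc (PySem.List.pyGetD xs (i + 1) 0)
  have hx := hc x
  rw [hwin] at h1 hx
  rw [hwin', PySem.Dict.getD_insert, PySem.Dict.getD_modify]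
  by_cases hxr : x = PySem.List.pyGetD xs (i + R) 0
  · subst hxr
    rw [PySem.Dict.getD_modify]
    by_cases hx1 : PySem.List.pyGetD xs (i + R) 0 = PySem.List.pyGetD xs (i + 1) 0 <;>
      simp_all [List.count_cons, List.count_append] <;> omega
  · rw [if_neg hxr]
    rw [PySem.Dict.getD_modify]
    by_cases hx1 : x = PySem.List.pyGetD xs (i + 1) 0 <;>
      simp_all [List.count_cons, List.count_append] <;> omega

-- B's main loop accumulates exactly the window-free elements
theorem pv_loopB (xs : List Int) (R : Int) (hR : 2 ≤ R) (limit : Int)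
    (_hlim : limit = (xs.length : Int) - R) :
    ∀ (fuel : Nat) (a : Int) (c : PySem.Dict Int Int) (acc : List Int),
      1 ≤ a → (limit + 1 - a).toNat = fuel →
      (∀ x, c.getD x 0 = ((pvWin xs R a).count x : Int)) →
      ((PySem.List.pyRange a (limit + 1) 1).foldl
        (fun (st : PySem.Dict Int Int × List Int) i =>
          let out := if st.1.getD (PySem.List.pyGetD xs i 0) 0 == 0
                     then st.2 ++ [PySem.List.pyGetD xs i 0] else st.2
          if i < limit then
            let c1 := st.1.modify (PySem.List.pyGetD xs (i + 1) 0) 0 (· - 1)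
            (c1.insert (PySem.List.pyGetD xs (i + R) 0)
               (c1.getD (PySem.List.pyGetD xs (i + R) 0) 0 + 1), out)
          else (st.1, out)) (c, acc)).2
      = acc ++ ((PySem.List.pyRange a (limit + 1) 1).filter
          (fun i => ((pvWin xs R i).count (PySem.List.pyGetD xs i 0) == 0))).map
            (fun j => PySem.List.pyGetD xs j 0) := by
  intro fuel
  induction fuel with
  | zero =>
    intro a c acc _ hf _
    rw [PySem.List.pyRange_one_eq_nil (by omega)]
    simp
  | succ m ih =>
    intro a c acc ha hf hc
    rw [PySem.List.pyRange_one_cons (by omega)]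
    simp only [List.foldl_cons, List.filter_cons]
    have hcg : (c.getD (PySem.List.pyGetD xs a 0) 0 == 0)
        = ((pvWin xs R a).count (PySem.List.pyGetD xs a 0) == 0) := by
      rw [hc]
      rcases Nat.eq_zero_or_pos ((pvWin xs R a).count (PySem.List.pyGetD xs a 0)) with h | h
      · simp [h]
      · have e2 : ¬ ((pvWin xs R a).count (PySem.List.pyGetD xs a 0) = 0) := by omega
        simp [e2]
    by_cases hlt : a < limit
    · rcases Bool.eq_false_or_eq_true ((pvWin xs R a).count (PySem.List.pyGetD xs a 0) == 0)
        with hz | hz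
      · rw [hz] at hcg
        simp only [hcg, hz, if_pos hlt]
        rw [ih (a + 1) _ _ (by omega) (by omega) (pv_step xs R a hR c hc)]
        simp
      · rw [hz] at hcg
        simp only [hcg, hz, if_pos hlt]
        rw [ih (a + 1) _ _ (by omega) (by omega) (pv_step xs R a hR c hc)]
        simp
    · rcases Bool.eq_false_or_eq_true ((pvWin xs R a).count (PySem.List.pyGetD xs a 0) == 0)
        with hz | hz
      · rw [hz] at hcg
        simp only [hcg, hz, if_neg hlt]
        rw [PySem.List.pyRange_one_eq_nil (a := a + 1) (by omega)]
        simp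
      · rw [hz] at hcg
        simp only [hcg, hz, if_neg hlt]
        rw [PySem.List.pyRange_one_eq_nil (a := a + 1) (by omega)]
        simp

-- ===== VERDICT (by name: the statement is the Claim_ definition above) =====
theorem consequtive_repetitions_spec : Claim_equal_consequtive_repetitions := by
  intro xs R _
  show consequtive_repetitions xs R = consequtive_repetitions_alt xs R
  rw [pvA_eq]
  simp only [consequtive_repetitions_alt]
  by_cases hg : R ≤ 1 ∨ (xs.length : Int) - R < 1
  · rw [if_pos hg]
    have hall : ∀ i ∈ PySem.List.pyRange 0 (xs.length : Int) 1, pvCond xs R i = true := by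
      intro i hi
      rw [PySem.List.mem_pyRange_one] at hi
      rcases hg with h | h
      · have hwnil : pvWin xs R i = [] := by
          rw [pvWin, PySem.List.pyRange_one_eq_nil (by omega)]
          simp
        simp [pvCond, hwnil]
      · by_cases h0 : i = 0
        · simp [pvCond, h0]
        · have hgt : i > (xs.length : Int) - R := by omega
          simp [pvCond, hgt]
    rw [List.filter_eq_self.mpr hall]
    simpa using pv_map_range_drop xs 0 (by omega)
  · rw [if_neg hg]
    rw [not_or, not_le, not_lt] at hg
    obtain ⟨hR1, hlim1⟩ := hg
    have hR2 : 2 ≤ R := by omega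
    have hn : (1 : Int) ≤ (xs.length : Int) - R := hlim1
    -- counter built before the loop counts the first window
    have hcnt0 : ∀ x,
        ((PySem.List.pyRange 2 (R + 1) 1).foldl
          (fun cnt j =>
            cnt.insert (PySem.List.pyGetD xs j 0) (cnt.getD (PySem.List.pyGetD xs j 0) 0 + 1))
          PySem.Dict.empty).getD x 0
        = ((pvWin xs R 1).count x : Int) := by
      intro x
      rw [← List.foldl_map (f := fun j => PySem.List.pyGetD xs j 0)
            (g := fun (d : PySem.Dict Int Int) v => d.insert v (d.getD v 0 + 1)),
          PySem.Dict.getD_foldl_insert_add_one, PySem.Dict.getD_empty]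
      have : pvWin xs R 1
          = (PySem.List.pyRange 2 (R + 1) 1).map (fun j => PySem.List.pyGetD xs j 0) := by
        rw [pvWin, show (1 : Int) + R = R + 1 by ring]
        norm_num
      rw [this]
      simp
    rw [pv_loopB xs R hR2 ((xs.length : Int) - R) rfl
          ((xs.length : Int) - R + 1 - 1).toNat 1 _ _ (by omega) rfl hcnt0]
    -- split A's index range into head, middle, tail
    rw [PySem.List.pyRange_one_append 0 ((xs.length : Int) - R + 1) (xs.length : Int)
          (by omega) (by omega),
        PySem.List.pyRange_one_cons (a := 0) (by omega), List.filter_append, List.filter_cons,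
        List.map_append]
    have htail : (PySem.List.pyRange ((xs.length : Int) - R + 1) (xs.length : Int) 1).filter
        (pvCond xs R) = PySem.List.pyRange ((xs.length : Int) - R + 1) (xs.length : Int) 1 := by
      rw [List.filter_eq_self]
      intro i hi
      rw [PySem.List.mem_pyRange_one] at hi
      have hgt : i > (xs.length : Int) - R := by omega
      simp [pvCond, hgt]
    have hmid : (PySem.List.pyRange (0 + 1) ((xs.length : Int) - R + 1) 1).filter (pvCond xs R)
        = (PySem.List.pyRange 1 ((xs.length : Int) - R + 1) 1).filter
            (fun i => ((pvWin xs R i).count (PySem.List.pyGetD xs i 0) == 0)) := by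
      rw [show (0 : Int) + 1 = 1 by ring]
      apply List.filter_congr
      intro i hi
      rw [PySem.List.mem_pyRange_one] at hi
      have h0 : (i == (0 : Int)) = false := by simp; omega
      have hgt : ¬ (i > (xs.length : Int) - R) := by omega
      simp [pvCond, h0, hgt]
    rw [hmid, htail, pv_map_range_drop xs ((xs.length : Int) - R + 1) (by omega),
        PySem.List.slice_from xs (by omega)]
    simp [pvCond]
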